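-- pv_equiv track=rewrite | github.com/chloeebubedike/All_pycharm_course_files | find_items_sep_by_amount.py | find_sep_by_amount
-- ===== SOURCE A (Python) =====
-- def find_sep_by_amount(list_of_num, amount):
--     result = []
--     # while list of numbers is true
--     while list_of_num:
--         num = list_of_num.pop()
--         diff = num - amount
--         if diff in list_of_num:
--             result.append((diff, num))
--     return result
-- ===== SOURCE B (Python) =====
-- # One forward pass with a set of previously seen numbers, output reversed: O(n)
-- # instead of A's O(n^2). Return-value equivalence only: A empties list_of_num
-- # in place, B leaves it untouched.
-- def find_sep_by_amount(list_of_num, amount):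
--     seen = set()
--     out = []
--     for num in list_of_num:
--         diff = num - amount
--         if diff in seen:
--             out.append((diff, num))
--         seen.add(num)
--     out.reverse()
--     return out
-- ===== Notes on version B (the rewrite author's own statement) =====
-- stated objective: faster
-- what changed: Replaced A's destructive pop-from-end loop with an O(n^2) membership scan of the remaining list by a single forward pass that keeps a hash set of numbers seen so far and reverses the collected pairs at the end; B does not mutate list_of_num (A empties it).
import Mathlib
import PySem

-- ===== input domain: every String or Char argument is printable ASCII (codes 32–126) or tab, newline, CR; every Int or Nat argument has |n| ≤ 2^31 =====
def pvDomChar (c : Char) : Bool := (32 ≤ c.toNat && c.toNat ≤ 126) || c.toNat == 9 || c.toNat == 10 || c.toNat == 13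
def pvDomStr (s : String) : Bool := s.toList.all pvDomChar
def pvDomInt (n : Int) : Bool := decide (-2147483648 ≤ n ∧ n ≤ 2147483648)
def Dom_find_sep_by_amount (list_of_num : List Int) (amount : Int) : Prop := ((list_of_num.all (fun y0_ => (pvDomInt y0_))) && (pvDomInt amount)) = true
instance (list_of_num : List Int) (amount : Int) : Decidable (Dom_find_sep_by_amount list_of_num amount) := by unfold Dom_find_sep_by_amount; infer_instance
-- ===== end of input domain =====

-- B replaces A's O(n^2) pop-and-scan loop by ONE forward pass with a set of
-- previously seen numbers, reversing the output at the end (O(n) expected in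
-- Python). Equivalence is about the RETURN value only: Python A empties
-- list_of_num in place, B leaves it untouched.

-- ===== PORT A =====
-- while list_of_num: num = list_of_num.pop(); diff = num - amount;
--   if diff in list_of_num: result.append((diff, num))
def findA_go (amount : Int) (xs : List Int) (result : List (Int × Int)) : List (Int × Int) :=
  if h : xs = [] then result
  else
    let num := xs.getLast h
    let rest := xs.dropLast
    let diff := num - amount
    findA_go amount rest (if rest.contains diff then result ++ [(diff, num)] else result)
termination_by xs.length
decreasing_by
  have := List.length_pos_of_ne_nil h
  simp [List.length_dropLast]; omega

def find_sep_by_amount (list_of_num : List Int) (amount : Int) : List (Int × Int) :=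
  findA_go amount list_of_num []

-- ===== PORT B =====
-- seen = set(); for num in list_of_num: if num-amount in seen: out.append(...);
-- seen.add(num); out.reverse(); return out
def find_sep_by_amount_alt (list_of_num : List Int) (amount : Int) : List (Int × Int) :=
  let p := list_of_num.foldl
    (fun (acc : PySem.Set Int × List (Int × Int)) num =>
      let diff := num - amount
      let out := if PySem.Set.contains acc.1 diff then acc.2 ++ [(diff, num)] else acc.2
      (PySem.Set.add acc.1 num, out))
    (PySem.Set.empty, [])
  p.2.reverse

-- ===== PRECONDITION & SPEC =====
def Spec_find_sep_by_amount (list_of_num : List Int) (amount : Int) (out : List (Int × Int)) : Prop := out = find_sep_by_amount_alt list_of_num amount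
instance (list_of_num : List Int) (amount : Int) (out : List (Int × Int)) : Decidable (Spec_find_sep_by_amount list_of_num amount out) := by unfold Spec_find_sep_by_amount; infer_instance

-- ===== CLAIM (what is proved, stated in full; the proofs are below) =====
def Claim_equal_find_sep_by_amount : Prop := ∀ (list_of_num : List Int) (amount : Int), Dom_find_sep_by_amount list_of_num amount → Spec_find_sep_by_amount list_of_num amount (find_sep_by_amount list_of_num amount)

-- ===== LEMMAS AND PROOFS =====

-- forward matches with an explicit "seen so far" prefix list
def fwd (amount : Int) (seen : List Int) : List Int → List (Int × Int)
  | [] => []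
  | x :: t =>
      (if seen.contains (x - amount) then [(x - amount, x)] else []) ++
        fwd amount (seen ++ [x]) t

theorem findA_go_acc (amount : Int) (xs : List Int) (res : List (Int × Int)) :
    findA_go amount xs res = res ++ findA_go amount xs [] := by
  induction xs using List.reverseRecOn generalizing res with
  | nil => simp [findA_go]
  | append_singleton ys x ih =>
      rw [findA_go]
      conv_rhs => rw [findA_go]
      rw [dif_neg (show ¬(ys ++ [x] = []) by simp), dif_neg (show ¬(ys ++ [x] = []) by simp)]
      simp only [List.getLast_concat, List.dropLast_concat]
      split_ifs with hc
      · rw [ih, ih (res := [] ++ [_])]; simp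
      · exact ih res

theorem fwd_snoc (amount : Int) (seen ys : List Int) (x : Int) :
    fwd amount seen (ys ++ [x]) =
      fwd amount seen ys ++
        (if (seen ++ ys).contains (x - amount) then [(x - amount, x)] else []) := by
  induction ys generalizing seen with
  | nil => simp [fwd]
  | cons y t ih =>
      simp only [List.cons_append, fwd, ih, List.append_assoc]; simp

theorem findA_go_eq_fwd (amount : Int) (xs : List Int) :
    findA_go amount xs [] = (fwd amount [] xs).reverse := by
  induction xs using List.reverseRecOn with
  | nil => simp [findA_go, fwd]
  | append_singleton ys x ih =>
      rw [findA_go]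
      rw [dif_neg (show ¬(ys ++ [x] = []) by simp)]
      simp only [List.getLast_concat, List.dropLast_concat]
      rw [findA_go_acc, ih, fwd_snoc]
      simp only [List.nil_append]
      split_ifs with hc <;> simp

theorem foldl_eq_fwd (amount : Int) (t : List Int) (s : PySem.Set Int)
    (seen : List Int) (out : List (Int × Int))
    (hs : ∀ y : Int, (y ∈ s) ↔ (y ∈ seen)) :
    (t.foldl
      (fun (acc : PySem.Set Int × List (Int × Int)) num =>
        let diff := num - amount
        let out := if PySem.Set.contains acc.1 diff then acc.2 ++ [(diff, num)] else acc.2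
        (PySem.Set.add acc.1 num, out)) (s, out)).2 =
      out ++ fwd amount seen t := by
  induction t generalizing s seen out with
  | nil => simp [fwd]
  | cons x t ih =>
      simp only [List.foldl_cons, fwd]
      have hmem : PySem.Set.contains s (x - amount) = seen.contains (x - amount) := by
        simp [PySem.Set.contains, hs]
      have hs' : ∀ y : Int, (y ∈ PySem.Set.add s x) ↔ (y ∈ seen ++ [x]) := by
        intro y; simp [PySem.Set.mem_add, hs, or_comm]
      rw [hmem]
      split_ifs with hc <;> rw [ih _ _ _ hs'] <;> simp

-- ===== VERDICT (by name: the statement is the Claim_ definition above) =====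
theorem find_sep_by_amount_spec : Claim_equal_find_sep_by_amount := by
  intro xs amount _
  show find_sep_by_amount xs amount = find_sep_by_amount_alt xs amount
  rw [find_sep_by_amount, find_sep_by_amount_alt, findA_go_eq_fwd]
  rw [foldl_eq_fwd amount xs PySem.Set.empty [] [] (by simp [PySem.Set.empty])]
  simp
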